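-- pv_equiv track=rewrite | github.com/Ananas5/APP3 | 3_bis.py | bestLeaders
-- ===== SOURCE A (Python) =====
-- def bestLeaders(lead):
--     maxiLead=0
--     l= len(lead)
--     leader= []
--
--     for i in lead:
--         if i>= maxiLead:
--             maxiLead= i
--
--     for i in range(l):
--         if lead[i] == maxiLead:
--             leader.append(i+1) #i+1 to have the value of the node and not the index
--
--     return leader, maxiLead
-- ===== SOURCE B (Python) =====
-- def bestLeaders(lead):
--     maxiLead = 0
--     leader = []
--     for i, v in enumerate(lead):
--         if v > maxiLead:
--             maxiLead = v
--             leader = [i + 1]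
--         elif v == maxiLead:
--             leader.append(i + 1)
--     return leader, maxiLead
-- ===== Notes on version B (the rewrite author's own statement) =====
-- stated objective: simpler
-- what changed: B finds the max and the positions achieving it in one pass with a reset-on-new-max accumulator, instead of A's two sequential passes (max first, then index filter).
import Mathlib
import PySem

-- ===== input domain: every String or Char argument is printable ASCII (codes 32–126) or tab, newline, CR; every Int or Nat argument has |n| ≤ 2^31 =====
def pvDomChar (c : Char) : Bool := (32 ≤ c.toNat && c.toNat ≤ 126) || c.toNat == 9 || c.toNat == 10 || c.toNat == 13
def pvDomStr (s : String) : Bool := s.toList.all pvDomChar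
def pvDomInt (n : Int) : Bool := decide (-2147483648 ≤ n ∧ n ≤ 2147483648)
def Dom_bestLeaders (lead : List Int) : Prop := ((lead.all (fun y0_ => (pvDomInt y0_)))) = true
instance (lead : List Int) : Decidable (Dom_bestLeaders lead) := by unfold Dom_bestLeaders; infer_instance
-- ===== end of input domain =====

-- B replaces A's two sequential passes (global max, then index filter) by a single
-- pass keeping the best-so-far maximum and resetting the position list on a new maximum
-- (objective: simpler; same asymptotic cost).

-- ===== PORT A =====
-- two passes: first the running maximum (seeded with 0), then a scan over range(l)
def bestLeaders (lead : List Int) : List Int × Int :=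
  let maxiLead : Int := lead.foldl (fun m i => if i ≥ m then i else m) 0
  let l : Int := PySem.List.len lead
  let leader : List Int := (PySem.List.pyRange 0 l).foldl
    (fun acc i => if PySem.List.pyGetD lead i 0 = maxiLead then acc ++ [i + 1] else acc) []
  (leader, maxiLead)

-- ===== PORT B =====
-- one pass over enumerate(lead), resetting the accumulator when a new maximum appears
def bestLeaders_alt (lead : List Int) : List Int × Int :=
  let r : List Int × Int := (PySem.List.enumerate lead).foldl
    (fun s p =>
      if p.2 > s.2 then ([p.1 + 1], p.2)
      else if p.2 = s.2 then (s.1 ++ [p.1 + 1], s.2)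
      else s) ([], 0)
  (r.1, r.2)

-- ===== PRECONDITION & SPEC =====
def Spec_bestLeaders (lead : List Int) (out : List Int × Int) : Prop := out = bestLeaders_alt lead
instance (lead : List Int) (out : List Int × Int) : Decidable (Spec_bestLeaders lead out) := by unfold Spec_bestLeaders; infer_instance

-- ===== CLAIM (what is proved, stated in full; the proofs are below) =====
def Claim_equal_bestLeaders : Prop := ∀ (lead : List Int), Dom_bestLeaders lead → Spec_bestLeaders lead (bestLeaders lead)

-- ===== LEMMAS AND PROOFS =====

/-- A's first loop: the running maximum seeded with `m`. -/
def pvAmax (xs : List Int) (m : Int) : Int := xs.foldl (fun m i => if i ≥ m then i else m) m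

/-- 1-based positions (offset `s`) at which `xs` takes the value `M`. -/
def pvPos (s : Int) (xs : List Int) (M : Int) : List Int :=
  match xs with
  | [] => []
  | x :: xs => (if x = M then [s + 1] else []) ++ pvPos (s + 1) xs M

theorem le_pvAmax (xs : List Int) (m : Int) : m ≤ pvAmax xs m := by
  induction xs generalizing m with
  | nil => simp [pvAmax]
  | cons x xs ih =>
    simp only [pvAmax, List.foldl_cons]
    split_ifs with h
    · exact le_trans h (ih x)
    · exact ih m

theorem pvAmax_cons (x : Int) (xs : List Int) (m : Int) :
    pvAmax (x :: xs) m = if x ≥ m then pvAmax xs x else pvAmax xs m := by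
  simp only [pvAmax, List.foldl_cons]
  split_ifs <;> rfl

/-- A's second loop, seen as a fold over `enumerate`, appends exactly the matching positions. -/
theorem Aloop (xs : List Int) (s : Int) (acc : List Int) (M : Int) :
    (PySem.List.enumerate xs s).foldl
      (fun acc p => if p.2 = M then acc ++ [p.1 + 1] else acc) acc
    = acc ++ pvPos s xs M := by
  induction xs generalizing s acc with
  | nil => simp [PySem.List.enumerate_nil, pvPos]
  | cons x xs ih =>
    rw [PySem.List.enumerate_cons]
    simp only [List.foldl_cons, pvPos]
    split_ifs with h
    · rw [ih]; simp
    · rw [ih]; simp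

/-- B's loop from an arbitrary state: it ends at the running maximum, keeps the
incoming accumulator iff no element beats the seed, and appends the matching positions. -/
theorem Bloop (xs : List Int) (s : Int) (acc : List Int) (m : Int) :
    (PySem.List.enumerate xs s).foldl
      (fun s p =>
        if p.2 > s.2 then ([p.1 + 1], p.2)
        else if p.2 = s.2 then (s.1 ++ [p.1 + 1], s.2)
        else s) (acc, m)
    = ((if pvAmax xs m = m then acc else []) ++ pvPos s xs (pvAmax xs m), pvAmax xs m) := by
  induction xs generalizing s acc m with
  | nil => simp [PySem.List.enumerate_nil, pvAmax, pvPos]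
  | cons x xs ih =>
    rw [PySem.List.enumerate_cons]
    simp only [List.foldl_cons, pvAmax_cons]
    by_cases hgt : x > m
    · have hge : x ≥ m := le_of_lt hgt
      simp only [hgt, if_pos hge, if_true]
      rw [ih]
      have hx : x ≤ pvAmax xs x := le_pvAmax xs x
      have hne : pvAmax xs x ≠ m := by omega
      simp only [if_neg hne, pvPos, List.nil_append]
      by_cases hxM : pvAmax xs x = x
      · simp [hxM]
      · have : x ≠ pvAmax xs x := fun h => hxM h.symm
        simp [hxM, this]
    · by_cases heq : x = m
      · subst heq
        have hge : x ≥ x := le_refl x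
        simp only [hgt, if_pos hge]
        rw [ih]
        by_cases hM : pvAmax xs x = x
        · simp [hM, pvPos, List.append_assoc]
        · have : x ≠ pvAmax xs x := fun h => hM h.symm
          simp [hM, pvPos, this]
      · have hlt : x < m := by omega
        have hge : ¬ x ≥ m := by omega
        simp only [hgt, if_neg hge, if_false, if_neg heq]
        rw [ih]
        have hm : m ≤ pvAmax xs m := le_pvAmax xs m
        have : x ≠ pvAmax xs m := by omega
        simp [pvPos, this]

/-- A's second loop over `range(len(lead))` is the fold over `enumerate`. -/
theorem Aloop_range (lead : List Int) (M : Int) :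
    (PySem.List.pyRange 0 (PySem.List.len lead)).foldl
      (fun acc i => if PySem.List.pyGetD lead i 0 = M then acc ++ [i + 1] else acc) []
    = pvPos 0 lead M := by
  have h := PySem.List.enumerate_eq_map_pyRange lead 0
  calc (PySem.List.pyRange 0 (PySem.List.len lead)).foldl
        (fun acc i => if PySem.List.pyGetD lead i 0 = M then acc ++ [i + 1] else acc) []
      = ((PySem.List.pyRange 0 (PySem.List.len lead)).map
          (fun j => (j, PySem.List.pyGetD lead j 0))).foldl
          (fun acc p => if p.2 = M then acc ++ [p.1 + 1] else acc) [] := by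
        rw [List.foldl_map]
    _ = (PySem.List.enumerate lead 0).foldl
          (fun acc p => if p.2 = M then acc ++ [p.1 + 1] else acc) [] := by rw [h]
    _ = pvPos 0 lead M := by rw [Aloop]; simp

-- ===== VERDICT (by name: the statement is the Claim_ definition above) =====
theorem bestLeaders_spec : Claim_equal_bestLeaders := by
  intro lead _
  show bestLeaders lead = bestLeaders_alt lead
  simp only [bestLeaders, bestLeaders_alt]
  rw [Aloop_range lead (lead.foldl (fun m i => if i ≥ m then i else m) 0)]
  have hB := Bloop lead 0 [] 0
  simp only [hB]
  have : lead.foldl (fun m i => if i ≥ m then i else m) 0 = pvAmax lead 0 := rfl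
  rw [this]
  split_ifs <;> simp
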